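-- pv_equiv track=rewrite | github.com/YHWriteCode/EconRAGent | kg_agent/api/webui_routes.py | _budget_by_workspace
-- ===== SOURCE A (Python) =====
-- def _budget_by_workspace(workspace_ids: list[str], max_nodes: int) -> dict[str, int]:
--     if not workspace_ids or max_nodes <= 0:
--         return {}
--     base = max_nodes // len(workspace_ids)
--     remainder = max_nodes % len(workspace_ids)
--     return {
--         workspace_id: base + (1 if index < remainder else 0)
--         for index, workspace_id in enumerate(workspace_ids)
--     }
-- ===== SOURCE B (Python) =====
-- def _budget_by_workspace(workspace_ids: list[str], max_nodes: int) -> dict[str, int]: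
--     if not workspace_ids or max_nodes <= 0:
--         return {}
--     result = {}
--     remaining = max_nodes
--     remaining_count = len(workspace_ids)
--     for workspace_id in workspace_ids:
--         share = -(-remaining // remaining_count)
--         result[workspace_id] = share
--         remaining -= share
--         remaining_count -= 1
--     return result
-- ===== Notes on version B (the rewrite author's own statement) =====
-- stated objective: alternative
-- what changed: Replaces the precomputed base/remainder dict comprehension with a single explicit loop that maintains two running counters (remaining budget and remaining id count) and allocates each id a ceiling-division share.
import Mathlib
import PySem

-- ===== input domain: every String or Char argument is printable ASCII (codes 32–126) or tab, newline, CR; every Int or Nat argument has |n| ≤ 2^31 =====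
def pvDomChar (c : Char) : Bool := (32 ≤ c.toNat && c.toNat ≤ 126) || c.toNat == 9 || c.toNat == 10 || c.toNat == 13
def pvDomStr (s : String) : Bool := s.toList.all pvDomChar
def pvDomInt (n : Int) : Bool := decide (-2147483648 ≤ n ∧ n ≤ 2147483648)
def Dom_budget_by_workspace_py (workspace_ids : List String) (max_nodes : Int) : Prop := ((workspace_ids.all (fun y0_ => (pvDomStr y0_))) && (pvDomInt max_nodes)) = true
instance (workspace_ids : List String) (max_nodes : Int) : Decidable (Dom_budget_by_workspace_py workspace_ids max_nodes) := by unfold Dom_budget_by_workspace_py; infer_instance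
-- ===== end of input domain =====

-- B replaces the base/remainder dict comprehension by one loop with two running
-- counters and per-step ceiling division; same cost, different decomposition.

-- ===== PORT A =====
def budget_by_workspace_py (workspace_ids : List String) (max_nodes : Int) : List (String × Int) :=
  if workspace_ids = [] ∨ max_nodes ≤ 0 then []
  else
    let n : Int := workspace_ids.length
    let base := PySem.Int.floordiv max_nodes n
    let remainder := PySem.Int.mod max_nodes n
    ((PySem.List.enumerate workspace_ids 0).foldl
      (fun d p => d.insert p.2 (base + (if p.1 < remainder then 1 else 0)))
      PySem.Dict.empty).items

-- ===== PORT B =====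
def budget_by_workspace_py_alt_go (ws : List String) (remaining remaining_count : Int)
    (d : PySem.Dict String Int) : PySem.Dict String Int :=
  match ws with
  | [] => d
  | w :: t =>
    let share := -(PySem.Int.floordiv (-remaining) remaining_count)
    budget_by_workspace_py_alt_go t (remaining - share) (remaining_count - 1) (d.insert w share)

def budget_by_workspace_py_alt (workspace_ids : List String) (max_nodes : Int) : List (String × Int) :=
  if workspace_ids = [] ∨ max_nodes ≤ 0 then []
  else (budget_by_workspace_py_alt_go workspace_ids max_nodes workspace_ids.length PySem.Dict.empty).items

-- ===== PRECONDITION & SPEC =====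
def Spec_budget_by_workspace_py (workspace_ids : List String) (max_nodes : Int) (out : List (String × Int)) : Prop := out = budget_by_workspace_py_alt workspace_ids max_nodes
instance (workspace_ids : List String) (max_nodes : Int) (out : List (String × Int)) : Decidable (Spec_budget_by_workspace_py workspace_ids max_nodes out) := by unfold Spec_budget_by_workspace_py; infer_instance

-- ===== CLAIM (what is proved, stated in full; the proofs are below) =====
def Claim_equal_budget_by_workspace_py : Prop := ∀ (workspace_ids : List String) (max_nodes : Int), Dom_budget_by_workspace_py workspace_ids max_nodes → Spec_budget_by_workspace_py workspace_ids max_nodes (budget_by_workspace_py workspace_ids max_nodes)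

-- ===== LEMMAS AND PROOFS =====

-- The per-step ceiling share equals A's base-plus-carry value at index k.
theorem share_eq (base r k cnt : Int) (hcnt : 0 < cnt) (hr0 : 0 ≤ r) (hr : r - k ≤ cnt) :
    -(PySem.Int.floordiv (-(base * cnt + max (r - k) 0)) cnt)
      = base + (if k < r then 1 else 0) := by
  rcases lt_or_ge k r with hk | hk
  · rw [max_eq_left (by omega), if_pos hk,
       PySem.Int.neg_floordiv_neg_eq_iff_of_pos hcnt]
    constructor
    · have : (base + 1 - 1) * cnt = base * cnt := by ring
      rw [this]; omega
    · have : (base + 1) * cnt = base * cnt + cnt := by ring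
      rw [this]; omega
  · rw [max_eq_right (by omega), if_neg (by omega)]
    simp only [add_zero]
    rw [PySem.Int.neg_floordiv_neg_eq_iff_of_pos hcnt]
    refine ⟨?_, le_refl _⟩
    have : (base - 1) * cnt = base * cnt - cnt := by ring
    rw [this]; omega

-- Loop invariant: B's loop with remaining = base*(n-k) + max(r-k,0) matches A's fold from index k.
theorem go_eq (base r n : Int) (hr0 : 0 ≤ r) (hrn : r < n) :
    ∀ (t : List String) (k : Int) (d : PySem.Dict String Int),
      0 ≤ k → k + t.length = n →
      budget_by_workspace_py_alt_go t (base * (n - k) + max (r - k) 0) (n - k) d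
        = (PySem.List.enumerate t k).foldl
            (fun d p => d.insert p.2 (base + (if p.1 < r then 1 else 0))) d := by
  intro t
  induction t with
  | nil => intro k d _ _; simp [budget_by_workspace_py_alt_go, PySem.List.enumerate_nil]
  | cons w tl ih =>
    intro k d hk hlen
    simp only [List.length_cons] at hlen
    have hcnt : 0 < n - k := by omega
    rw [PySem.List.enumerate_cons]
    simp only [budget_by_workspace_py_alt_go, List.foldl_cons]
    rw [share_eq base r k (n - k) hcnt hr0 (by omega)]
    have h1 : base * (n - k) + max (r - k) 0 - (base + (if k < r then 1 else 0))
        = base * (n - (k + 1)) + max (r - (k + 1)) 0 := by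
      rcases lt_or_ge k r with hkr | hkr
      · rw [if_pos hkr, max_eq_left (by omega), max_eq_left (by omega)]; ring
      · rw [if_neg (by omega), max_eq_right (by omega), max_eq_right (by omega)]; ring
    have h2 : n - k - 1 = n - (k + 1) := by ring
    rw [h1, h2, ih (k + 1) _ (by omega) (by omega)]

-- ===== VERDICT (by name: the statement is the Claim_ definition above) =====
theorem budget_by_workspace_py_spec : Claim_equal_budget_by_workspace_py := by
  intro ws m _
  unfold Spec_budget_by_workspace_py budget_by_workspace_py budget_by_workspace_py_alt
  split_ifs with h
  · rfl
  · rw [not_or] at h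
    obtain ⟨hne', hm'0⟩ := h
    have hne := hne'
    have hm := lt_of_not_ge (fun hh => hm'0 (by omega))
    have hn : 0 < (ws.length : Int) := by
      simp only [Int.natCast_pos]
      exact List.length_pos_iff.mpr hne
    have hr0 : 0 ≤ PySem.Int.mod m ws.length := PySem.Int.mod_nonneg m hn
    have hrn : PySem.Int.mod m ws.length < ws.length := PySem.Int.mod_lt m hn
    have key := go_eq (PySem.Int.floordiv m ws.length) (PySem.Int.mod m ws.length)
      (ws.length : Int) hr0 hrn ws 0 PySem.Dict.empty (by omega) (by omega)
    have hm' : PySem.Int.floordiv m ws.length * ((ws.length : Int) - 0)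
        + max (PySem.Int.mod m ws.length - 0) 0 = m := by
      have h := PySem.Int.floordiv_mul_add_mod m (ws.length : Int)
      rw [max_eq_left (by omega), sub_zero]; omega
    rw [hm', sub_zero] at key
    rw [key]
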